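-- pv_equiv track=rewrite | github.com/sonpham-org/AmnesiaBenchResults | amnesia_bench/arc_evaluate.py | _replay_search_log
-- ===== SOURCE A (Python) =====
-- def _replay_search_log(log: list, initial_lo: int, initial_hi: int) -> tuple:
--     """Replay a search log to reconstruct current lo/hi state."""
--     lo, hi = initial_lo, initial_hi
--     for entry in log:
--         n = entry["N"]
--         if entry["passed"]:
--             hi = n
--         else:
--             lo = n
--     return lo, hi
-- ===== SOURCE B (Python) =====
-- def _replay_search_log(log: list, initial_lo: int, initial_hi: int) -> tuple:
--     """Reverse scan: the final lo/hi are the last failed/passed N, found from the back."""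
--     lo, hi = initial_lo, initial_hi
--     got_lo = False
--     got_hi = False
--     for entry in reversed(log):
--         n = entry["N"]
--         if entry["passed"]:
--             if not got_hi:
--                 hi = n
--                 got_hi = True
--         else:
--             if not got_lo:
--                 lo = n
--                 got_lo = True
--         if got_lo and got_hi:
--             break
--     return lo, hi
-- ===== Notes on version B (the rewrite author's own statement) =====
-- stated objective: alternative
-- what changed: Forward replay overwriting lo/hi on every entry is replaced by a backward scan that fixes lo/hi at the last failed/passed entry and stops early once both are found.
import Mathlib
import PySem

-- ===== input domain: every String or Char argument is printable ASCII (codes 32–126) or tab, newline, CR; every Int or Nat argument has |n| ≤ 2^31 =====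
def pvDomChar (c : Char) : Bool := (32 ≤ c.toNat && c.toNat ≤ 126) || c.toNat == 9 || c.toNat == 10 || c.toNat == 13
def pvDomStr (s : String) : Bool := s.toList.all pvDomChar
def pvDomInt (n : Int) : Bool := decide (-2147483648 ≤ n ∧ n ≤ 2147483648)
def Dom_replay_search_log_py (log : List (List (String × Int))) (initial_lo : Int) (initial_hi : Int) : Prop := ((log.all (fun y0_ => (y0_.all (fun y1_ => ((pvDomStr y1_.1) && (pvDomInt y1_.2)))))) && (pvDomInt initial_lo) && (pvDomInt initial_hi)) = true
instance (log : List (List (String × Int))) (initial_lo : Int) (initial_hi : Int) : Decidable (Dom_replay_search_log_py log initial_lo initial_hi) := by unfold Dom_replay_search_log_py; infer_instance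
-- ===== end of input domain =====

-- B replaces A's forward replay (overwrite lo/hi at every entry) by a backward scan that
-- pins lo/hi at the last failed/passed entry and breaks once both are found (alternative).

-- entry["k"]: first-match lookup in the association list; none = KeyError (excluded by Pre_)
def pvKey (e : List (String × Int)) (k : String) : Option Int :=
  (e.find? (fun p => p.1 == k)).map (·.2)

-- ===== PORT A =====
-- A's forward loop; none propagates a KeyError (outside Pre_)
def pvALoop : List (List (String × Int)) → Int → Int → Option (Int × Int)
  | [], lo, hi => some (lo, hi)
  | e :: rest, lo, hi =>
    match pvKey e "N", pvKey e "passed" with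
    | some n, some p => if p ≠ 0 then pvALoop rest lo n else pvALoop rest n hi
    | _, _ => none

def replay_search_log_py (log : List (List (String × Int))) (initial_lo : Int) (initial_hi : Int) : Int × Int :=
  (pvALoop log initial_lo initial_hi).getD (initial_lo, initial_hi)

-- ===== PORT B =====
-- B's backward loop over the reversed log with got_lo/got_hi flags and early break
def pvBLoop : List (List (String × Int)) → Bool → Bool → Int → Int → Option (Int × Int)
  | [], _, _, lo, hi => some (lo, hi)
  | e :: rest, got_lo, got_hi, lo, hi =>
    match pvKey e "N", pvKey e "passed" with
    | some n, some p =>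
      let (lo', hi', gl', gh') :=
        if p ≠ 0 then (if got_hi then (lo, hi, got_lo, got_hi) else (lo, n, got_lo, true))
        else (if got_lo then (lo, hi, got_lo, got_hi) else (n, hi, true, got_hi))
      if gl' && gh' then some (lo', hi') else pvBLoop rest gl' gh' lo' hi'
    | _, _ => none

def replay_search_log_py_alt (log : List (List (String × Int))) (initial_lo : Int) (initial_hi : Int) : Int × Int :=
  (pvBLoop log.reverse false false initial_lo initial_hi).getD (initial_lo, initial_hi)

-- ===== PRECONDITION & SPEC =====
-- Pre_ excludes exactly the entries lacking key "N" or "passed", on which Python A raises KeyError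
def Pre_replay_search_log_py (log : List (List (String × Int))) (initial_lo : Int) (initial_hi : Int) : Prop :=
  (log.all (fun e => (pvKey e "N").isSome && (pvKey e "passed").isSome)) = true

instance (log : List (List (String × Int))) (initial_lo : Int) (initial_hi : Int) : Decidable (Pre_replay_search_log_py log initial_lo initial_hi) := by unfold Pre_replay_search_log_py; infer_instance

def pvWitness_replay_search_log_py : (List (List (String × Int))) × Int × Int :=
  ([[("N", 3), ("passed", 1)], [("N", 7), ("passed", 0)]], 0, 10)

def Spec_replay_search_log_py (log : List (List (String × Int))) (initial_lo : Int) (initial_hi : Int) (out : Int × Int) : Prop := out = replay_search_log_py_alt log initial_lo initial_hi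
instance (log : List (List (String × Int))) (initial_lo : Int) (initial_hi : Int) (out : Int × Int) : Decidable (Spec_replay_search_log_py log initial_lo initial_hi out) := by unfold Spec_replay_search_log_py; infer_instance

-- ===== CLAIM (what is proved, stated in full; the proofs are below) =====
def Claim_equal_replay_search_log_py : Prop := ∀ (log : List (List (String × Int))) (initial_lo : Int) (initial_hi : Int), Dom_replay_search_log_py log initial_lo initial_hi → Pre_replay_search_log_py log initial_lo initial_hi → Spec_replay_search_log_py log initial_lo initial_hi (replay_search_log_py log initial_lo initial_hi)

-- ===== LEMMAS AND PROOFS =====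

-- abstract versions over extracted (n, passed) pairs
def pvPairs (log : List (List (String × Int))) : List (Int × Bool) :=
  log.map (fun e => ((pvKey e "N").getD 0, ((pvKey e "passed").getD 0) ≠ 0))

def pvFA : List (Int × Bool) → Int → Int → Int × Int
  | [], lo, hi => (lo, hi)
  | (n, p) :: rest, lo, hi => if p then pvFA rest lo n else pvFA rest n hi

def pvFirstFail : List (Int × Bool) → Int → Int
  | [], lo => lo
  | (n, p) :: rest, lo => if p then pvFirstFail rest lo else n

def pvFirstPass : List (Int × Bool) → Int → Int
  | [], hi => hi
  | (n, p) :: rest, hi => if p then n else pvFirstPass rest hi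

def pvFB : List (Int × Bool) → Bool → Bool → Int → Int → Int × Int
  | [], _, _, lo, hi => (lo, hi)
  | (n, p) :: rest, got_lo, got_hi, lo, hi =>
    let (lo', hi', gl', gh') :=
      if p then (if got_hi then (lo, hi, got_lo, got_hi) else (lo, n, got_lo, true))
      else (if got_lo then (lo, hi, got_lo, got_hi) else (n, hi, true, got_hi))
    if gl' && gh' then (lo', hi') else pvFB rest gl' gh' lo' hi'

lemma pvALoop_eq (log : List (List (String × Int))) (lo hi : Int)
    (h : ∀ e ∈ log, (pvKey e "N").isSome ∧ (pvKey e "passed").isSome) :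
    pvALoop log lo hi = some (pvFA (pvPairs log) lo hi) := by
  induction log generalizing lo hi with
  | nil => rfl
  | cons e rest ih =>
    obtain ⟨hN, hP⟩ := h e (List.mem_cons_self ..)
    obtain ⟨n, hn⟩ := Option.isSome_iff_exists.mp hN
    obtain ⟨p, hp⟩ := Option.isSome_iff_exists.mp hP
    have ih' := fun lo hi => ih lo hi (fun e he => h e (List.mem_cons_of_mem _ he))
    simp [pvALoop, pvPairs, pvFA, hn, hp]
    split_ifs with hpz <;> simp_all [pvPairs]

lemma pvBLoop_eq (log : List (List (String × Int))) (gl gh : Bool) (lo hi : Int)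
    (h : ∀ e ∈ log, (pvKey e "N").isSome ∧ (pvKey e "passed").isSome) :
    pvBLoop log gl gh lo hi = some (pvFB (pvPairs log) gl gh lo hi) := by
  induction log generalizing gl gh lo hi with
  | nil => rfl
  | cons e rest ih =>
    obtain ⟨hN, hP⟩ := h e (List.mem_cons_self ..)
    obtain ⟨n, hn⟩ := Option.isSome_iff_exists.mp hN
    obtain ⟨p, hp⟩ := Option.isSome_iff_exists.mp hP
    have ih' := fun gl gh lo hi => ih gl gh lo hi (fun e he => h e (List.mem_cons_of_mem _ he))
    simp only [pvBLoop, pvPairs, pvFB, hn, hp, List.map_cons]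
    split_ifs <;> simp_all [pvPairs]

-- B's scan with flags computes first-fail / first-pass (or keeps the pinned value)
lemma pvFB_char (l : List (Int × Bool)) (gl gh : Bool) (lo hi : Int) :
    pvFB l gl gh lo hi =
      (if gl then lo else pvFirstFail l lo, if gh then hi else pvFirstPass l hi) := by
  induction l generalizing gl gh lo hi with
  | nil => cases gl <;> cases gh <;> rfl
  | cons x rest ih =>
    obtain ⟨n, p⟩ := x
    cases p <;> cases gl <;> cases gh <;>
      simp [pvFB, pvFirstFail, pvFirstPass, ih]

lemma pvFirstFail_append (a b : List (Int × Bool)) (lo : Int) :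
    pvFirstFail (a ++ b) lo = pvFirstFail a (pvFirstFail b lo) := by
  induction a with
  | nil => rfl
  | cons x rest ih => obtain ⟨n, p⟩ := x; cases p <;> simp [pvFirstFail, ih]

lemma pvFirstPass_append (a b : List (Int × Bool)) (hi : Int) :
    pvFirstPass (a ++ b) hi = pvFirstPass a (pvFirstPass b hi) := by
  induction a with
  | nil => rfl
  | cons x rest ih => obtain ⟨n, p⟩ := x; cases p <;> simp [pvFirstPass, ih]

-- A's forward fold equals first-fail / first-pass over the reversed pairs
lemma pvFA_char (l : List (Int × Bool)) (lo hi : Int) :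
    pvFA l lo hi = (pvFirstFail l.reverse lo, pvFirstPass l.reverse hi) := by
  induction l generalizing lo hi with
  | nil => rfl
  | cons x rest ih =>
    obtain ⟨n, p⟩ := x
    cases p <;>
      simp [pvFA, ih, List.reverse_cons, pvFirstFail_append, pvFirstPass_append,
        pvFirstFail, pvFirstPass]

-- ===== VERDICT (by name: the statement is the Claim_ definition above) =====
theorem replay_search_log_py_spec : Claim_equal_replay_search_log_py := by
  intro log lo hi _ hpre
  have h : ∀ e ∈ log, (pvKey e "N").isSome ∧ (pvKey e "passed").isSome := by
    intro e he
    have := List.all_eq_true.mp hpre e he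
    simpa using this
  have hrev : ∀ e ∈ log.reverse, (pvKey e "N").isSome ∧ (pvKey e "passed").isSome := by
    intro e he; exact h e (List.mem_reverse.mp he)
  unfold Spec_replay_search_log_py replay_search_log_py replay_search_log_py_alt
  rw [pvALoop_eq log lo hi h, pvBLoop_eq log.reverse false false lo hi hrev]
  have : pvPairs log.reverse = (pvPairs log).reverse := by simp [pvPairs]
  rw [this, pvFB_char, pvFA_char]
  simp
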